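-- pv_equiv track=rewrite | github.com/mysql/mysql-utilities | mysql/utilities/common/gtid.py | gtid_set_union
-- ===== SOURCE A (Python) =====
-- def gtid_set_union(gtid_set_a, gtid_set_b):
--     """Perform the union of two GTID sets.
--
--     This method computes the union of two GTID sets and returns the result of
--     the operation.
--
--     Note: This method support input GTID sets not in the normalized form,
--     i.e., with unordered and repeated UUID sets and intervals, but with
--     a valid syntax.
--
--     gtid_set_a[in]      First GTID set (set A).
--     gtid_set_b[in]      Second GTID set (set B).
--
--     Returns a string with the result of the set union operation between the
--     two given GTID sets.
--     """
--     def get_gtid_dict(gtid_a, gtid_b):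
--         """Get a dict representation of the specified GTID sets.
--
--         Combine the given GTID sets into a single dict structure, removing
--         duplicated UUIDs and string intervals.
--
--         Return a dictionary (not normalized) with the GTIDs contained in both
--         input GTID sets. For example, for the given (not normalized) GTID sets
--         'uuid_a:2:5-7,uuid_b:4' and 'uuid_a:2:4-6:2,uuid_b:1-3' the follow dict
--         will be returned:
--         {'uuid_a': set(['2', '5-7', '4-6']), 'uuid_b': set(['4','1-3'])}
--         """
--         res_dict = {}
--         uuid_sets_a = gtid_a.split(',')
--         uuid_sets_b = gtid_b.split(',')
--         uuid_sets = uuid_sets_a + uuid_sets_b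
--         for uuid_set in uuid_sets:
--             uuid_set_values = uuid_set.split(':')
--             uuid_key = uuid_set_values[0]
--             if uuid_key in res_dict:
--                 res_dict[uuid_key] = \
--                     res_dict[uuid_key].union(uuid_set_values[1:])
--             else:
--                 res_dict[uuid_key] = set(uuid_set_values[1:])
--         return res_dict
--
--     # Create auxiliary dict representation of both input GTID sets.
--     gtid_dict = get_gtid_dict(gtid_set_a, gtid_set_b)
--
--     # Perform the union between the GTID sets.
--     union_gtid_list = []
--     for uuid in gtid_dict:
--         intervals = gtid_dict[uuid]
--         # Convert the set of string intervals into a single list of tuples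
--         # with integers, in order to be handled easily.
--         intervals_list = []
--         for values in intervals:
--             interval = values.split('-')
--             intervals_list.append((int(interval[0]), int(interval[-1])))
--         # Compute the union of the tuples (intervals).
--         union_set = []
--         for start, end in sorted(intervals_list):
--             # Note: no interval start before the next one (ordered list).
--             if union_set and start <= union_set[-1][1] + 1:
--                 # Current interval intersects or is consecutive to the last
--                 # one in the results.
--                 if union_set[-1][1] < end:
--                     # If the end of the interval is greater than the last one
--                     # then augment it (set the new end), otherwise do nothing
--                     # (meaning the interval is fully included in the last one).
--                     union_set[-1] = (union_set[-1][0], end)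
--             else:
--                 # No interval in the results or the interval does not intersect
--                 # nor is consecutive to the last one, then add it to the end of
--                 # the results list.
--                 union_set.append((start, end))
--         # Convert resulting union set to a valid string format.
--         union_str = ":".join(
--             ["{0}-{1}".format(vals[0], vals[1])
--              if vals[0] != vals[1] else str(vals[0]) for vals in union_set]
--         )
--         # Concatenate UUID and add the to the result list.
--         union_gtid_list.append("{0}:{1}".format(uuid, union_str))
--
--     # GTID sets are sorted alphabetically, return the result accordingly.
--     return ','.join(sorted(union_gtid_list))
-- ===== SOURCE B (Python) =====
-- def gtid_set_union(gtid_set_a, gtid_set_b):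
--     """Union of two GTID sets: group interval strings by uuid, then merge
--     each uuid's intervals back-to-front with a pop-while stack over the
--     descending-sorted pairs."""
--     groups = {}
--     for uuid_set in gtid_set_a.split(',') + gtid_set_b.split(','):
--         parts = uuid_set.split(':')
--         groups.setdefault(parts[0], set()).update(parts[1:])
--     lines = []
--     for uuid, texts in groups.items():
--         pairs = []
--         for text in texts:
--             ends = text.split('-')
--             pairs.append((int(ends[0]), int(ends[-1])))
--         merged = []
--         for start, end in sorted(pairs, reverse=True):
--             while merged and merged[0][0] <= end + 1:
--                 end = max(end, merged[0][1])
--                 merged.pop(0)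
--             merged.insert(0, (start, end))
--         body = ":".join(str(s) if s == e else "{0}-{1}".format(s, e)
--                         for s, e in merged)
--         lines.append("{0}:{1}".format(uuid, body))
--     return ','.join(sorted(lines))
-- ===== Notes on version B (the rewrite author's own statement) =====
-- stated objective: alternative
-- what changed: Per uuid, A sorts the parsed intervals ascending and sweeps forward, mutating the last element of its result list to extend it; B sorts them descending and builds the merged list back-to-front with a pop-while stack, absorbing everything the new interval reaches from the front before pushing it.
import Mathlib
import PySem

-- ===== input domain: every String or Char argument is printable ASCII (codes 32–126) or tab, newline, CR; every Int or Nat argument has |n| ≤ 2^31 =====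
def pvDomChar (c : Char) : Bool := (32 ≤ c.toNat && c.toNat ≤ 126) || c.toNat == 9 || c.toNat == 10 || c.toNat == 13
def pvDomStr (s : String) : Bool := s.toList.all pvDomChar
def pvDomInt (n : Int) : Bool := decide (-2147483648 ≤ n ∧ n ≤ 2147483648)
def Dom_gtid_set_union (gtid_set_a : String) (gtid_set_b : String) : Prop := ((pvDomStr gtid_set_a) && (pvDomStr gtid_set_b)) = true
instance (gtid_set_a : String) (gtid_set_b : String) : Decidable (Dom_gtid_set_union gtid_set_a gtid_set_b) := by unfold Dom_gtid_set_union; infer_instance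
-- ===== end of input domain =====

-- B replaces A's forward sweep (append / mutate-last on an ascending sort) by a back-to-front
-- stack: it sorts each uuid's intervals descending and merges each one into the front of the
-- stack with a pop-while loop.  Objective: alternative algorithm, same cost; return values only.

-- shared primitive helpers (str.split with a non-empty literal separator; int(s) — Pre_ rules out ValueError)
def pvSplit (s sep : String) : List String := (PySem.Str.split? s sep).getD []
def pvParseInt (s : String) : Int := (PySem.Int.ofStr? s).getD 0

-- ===== PORT A =====
-- get_gtid_dict: dict uuid -> set of interval strings, built from both GTID sets
def gtidDictA (gtid_set_a : String) (gtid_set_b : String) : PySem.Dict String (PySem.Set String) :=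
  (pvSplit gtid_set_a "," ++ pvSplit gtid_set_b ",").foldl
    (fun res_dict uuid_set =>
      let uuid_set_values := pvSplit uuid_set ":"
      let uuid_key := uuid_set_values.headD ""   -- uuid_set_values[0]; split? is never empty
      match res_dict.get? uuid_key with
      | some s => res_dict.insert uuid_key (PySem.Set.union s (uuid_set_values.drop 1))
      | none   => res_dict.insert uuid_key (PySem.Set.ofList (uuid_set_values.drop 1)))
    PySem.Dict.empty

def gtid_set_union (gtid_set_a : String) (gtid_set_b : String) : String :=
  let gtid_dict := gtidDictA gtid_set_a gtid_set_b
  let union_gtid_list := gtid_dict.items.foldl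
    (fun acc kv =>
      let intervals_list := kv.2.foldl
        (fun l values =>
          let interval := pvSplit values "-"
          l ++ [(pvParseInt (interval.headD ""), pvParseInt (interval.getLastD ""))]) []
      let union_set := (PySem.List.sorted2 intervals_list (fun p => p.1) (fun p => p.2)).foldl
        (fun us p =>
          match us.getLast? with
          | some last =>
            if p.1 ≤ last.2 + 1 then
              if last.2 < p.2 then us.dropLast ++ [(last.1, p.2)] else us
            else us ++ [p]
          | none => us ++ [p]) []
      let union_str := PySem.Str.join ":" (union_set.map
        (fun vals =>
          if vals.1 ≠ vals.2 then PySem.Str.join "-" [PySem.Int.toStr vals.1, PySem.Int.toStr vals.2]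
          else PySem.Int.toStr vals.1))
      acc ++ [PySem.Str.join ":" [kv.1, union_str]])
    []
  PySem.Str.join "," (PySem.List.sorted union_gtid_list (fun s => s))

-- ===== PORT B =====
-- the 'while merged and merged[0][0] <= end + 1' pop loop: returns (remaining stack, grown end)
def popMergeB : List (Int × Int) → Int → List (Int × Int) × Int
  | [], e => ([], e)
  | q :: rest, e => if q.1 ≤ e + 1 then popMergeB rest (max e q.2) else (q :: rest, e)

-- one iteration of B's merge loop: pop-absorb from the front, then push the interval
def bstepB (merged : List (Int × Int)) (p : Int × Int) : List (Int × Int) :=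
  let r := popMergeB merged p.2
  (p.1, r.2) :: r.1

def gtid_set_union_alt (gtid_set_a : String) (gtid_set_b : String) : String :=
  let groups := (pvSplit gtid_set_a "," ++ pvSplit gtid_set_b ",").foldl
    (fun d uuid_set =>
      let parts := pvSplit uuid_set ":"
      let key := parts.headD ""   -- parts[0]; split? is never empty
      d.insert key (PySem.Set.update ((d.get? key).getD PySem.Set.empty) (parts.drop 1)))
    PySem.Dict.empty
  let lines := groups.items.foldl
    (fun acc kv =>
      let pairs := kv.2.foldl
        (fun l text =>
          let ends := pvSplit text "-"
          l ++ [(pvParseInt (ends.headD ""), pvParseInt (ends.getLastD ""))]) []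
      let merged := (PySem.List.sorted2 pairs (fun p => p.1) (fun p => p.2) true).foldl bstepB []
      let body := PySem.Str.join ":" (merged.map
        (fun p =>
          if p.1 = p.2 then PySem.Int.toStr p.1
          else PySem.Str.join "-" [PySem.Int.toStr p.1, PySem.Int.toStr p.2]))
      acc ++ [PySem.Str.join ":" [kv.1, body]])
    []
  PySem.Str.join "," (PySem.List.sorted lines (fun s => s))

-- ===== PRECONDITION & SPEC =====
-- Pre_ excludes exactly the inputs where Python A raises ValueError: some interval string whose
-- first or last '-'-part is not accepted by int().
def Pre_gtid_set_union (gtid_set_a : String) (gtid_set_b : String) : Prop :=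
  ∀ chunk ∈ pvSplit gtid_set_a "," ++ pvSplit gtid_set_b ",",
    ∀ t ∈ (pvSplit chunk ":").drop 1,
      (PySem.Int.ofStr? ((pvSplit t "-").headD "")).isSome = true ∧
      (PySem.Int.ofStr? ((pvSplit t "-").getLastD "")).isSome = true
instance (gtid_set_a : String) (gtid_set_b : String) : Decidable (Pre_gtid_set_union gtid_set_a gtid_set_b) := by
  unfold Pre_gtid_set_union; infer_instance
def pvWitness_gtid_set_union : String × String := ("u:2:5-7,v:4", "u:4-6:2,v:1-3")
def Spec_gtid_set_union (gtid_set_a : String) (gtid_set_b : String) (out : String) : Prop := out = gtid_set_union_alt gtid_set_a gtid_set_b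
instance (gtid_set_a : String) (gtid_set_b : String) (out : String) : Decidable (Spec_gtid_set_union gtid_set_a gtid_set_b out) := by unfold Spec_gtid_set_union; infer_instance

-- ===== CLAIM (what is proved, stated in full; the proofs are below) =====
def Claim_equal_gtid_set_union : Prop := ∀ (gtid_set_a : String) (gtid_set_b : String), Dom_gtid_set_union gtid_set_a gtid_set_b → Pre_gtid_set_union gtid_set_a gtid_set_b → Spec_gtid_set_union gtid_set_a gtid_set_b (gtid_set_union gtid_set_a gtid_set_b)

-- ===== LEMMAS AND PROOFS =====

-- A's inline merge step, named for the proofs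
def fstepA (us : List (Int × Int)) (p : Int × Int) : List (Int × Int) :=
  match us.getLast? with
  | some last =>
    if p.1 ≤ last.2 + 1 then
      if last.2 < p.2 then us.dropLast ++ [(last.1, p.2)] else us
    else us ++ [p]
  | none => us ++ [p]

-- Python's lexicographic ≤ on int pairs
def lexLe (a b : Int × Int) : Prop := a.1 < b.1 ∨ (a.1 = b.1 ∧ a.2 ≤ b.2)

theorem groups_eq (a b : String) :
    (pvSplit a "," ++ pvSplit b ",").foldl
      (fun d uuid_set =>
        let parts := pvSplit uuid_set ":"
        let key := parts.headD ""
        d.insert key (PySem.Set.update ((d.get? key).getD PySem.Set.empty) (parts.drop 1)))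
      PySem.Dict.empty = gtidDictA a b := by
  unfold gtidDictA
  apply PySem.List.foldl_congr_mem
  intro d u _
  simp only
  cases h : d.get? ((pvSplit u ":").headD "") with
  | some s => rfl
  | none =>
    show d.insert _ (PySem.Set.update PySem.Set.empty _) = d.insert _ (PySem.Set.ofList _)
    rw [PySem.Set.ofList_eq_foldl]; rfl

theorem pairwise_insertBy {α : Type} (before : α → α → Bool) (le : α → α → Prop)
    (hcompat : ∀ a b, before a b = true → le a b)
    (hcompat2 : ∀ a b, before a b = false → le b a)
    (htrans : ∀ a b c, le a b → le b c → le a c)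
    (x : α) (acc : List α) (h : acc.Pairwise le) :
    (PySem.List.insertBy before x acc).Pairwise le := by
  induction acc with
  | nil => simp [PySem.List.insertBy]
  | cons y ys ih =>
    rw [List.pairwise_cons] at h
    obtain ⟨hy, hys⟩ := h
    by_cases hb : before x y = true
    · rw [show PySem.List.insertBy before x (y :: ys) = x :: y :: ys by
        simp [PySem.List.insertBy, hb]]
      refine List.Pairwise.cons ?_ (List.Pairwise.cons hy hys)
      intro z hz
      rcases List.mem_cons.mp hz with rfl | hz
      · exact hcompat _ _ hb
      · exact htrans _ _ _ (hcompat _ _ hb) (hy z hz)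
    · rw [show PySem.List.insertBy before x (y :: ys) = y :: PySem.List.insertBy before x ys by
        simp [PySem.List.insertBy, hb]]
      refine List.Pairwise.cons ?_ (ih hys)
      intro z hz
      rw [PySem.List.mem_insertBy] at hz
      rcases hz with rfl | hz
      · exact hcompat2 _ _ (by simpa using hb)
      · exact hy z hz

theorem foldl_insertBy_pairwise {α : Type} (before : α → α → Bool) (le : α → α → Prop)
    (hcompat : ∀ a b, before a b = true → le a b)
    (hcompat2 : ∀ a b, before a b = false → le b a)
    (htrans : ∀ a b c, le a b → le b c → le a c)
    (xs : List α) (acc : List α) (h : acc.Pairwise le) :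
    (xs.foldl (fun acc x => PySem.List.insertBy before x acc) acc).Pairwise le := by
  induction xs generalizing acc with
  | nil => simpa
  | cons x t ih => exact ih _ (pairwise_insertBy before le hcompat hcompat2 htrans x acc h)

theorem sorted2_pairwise_lex (ps : List (Int × Int)) :
    (PySem.List.sorted2 ps (fun p => p.1) (fun p => p.2)).Pairwise lexLe := by
  unfold PySem.List.sorted2
  simp only
  apply foldl_insertBy_pairwise _ _ ?_ ?_ ?_ _ _ List.Pairwise.nil
  · intro a b h; simp at h; unfold lexLe; omega
  · intro a b h; simp at h; unfold lexLe; omega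
  · intro a b c h1 h2; unfold lexLe at *; omega

theorem sorted2_pairwise_lex_rev (ps : List (Int × Int)) :
    (PySem.List.sorted2 ps (fun p => p.1) (fun p => p.2) true).Pairwise (fun a b => lexLe b a) := by
  unfold PySem.List.sorted2
  simp only
  apply foldl_insertBy_pairwise _ _ ?_ ?_ ?_ _ _ List.Pairwise.nil
  · intro a b h; simp at h; unfold lexLe; omega
  · intro a b h; simp at h; unfold lexLe; omega
  · intro a b c h1 h2; unfold lexLe at *; omega

-- sorted2 descending is the reverse of sorted2 ascending (full-pair key: ties are equal pairs)
theorem sorted2_true_eq_reverse (ps : List (Int × Int)) :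
    PySem.List.sorted2 ps (fun p => p.1) (fun p => p.2) true
      = (PySem.List.sorted2 ps (fun p => p.1) (fun p => p.2)).reverse := by
  have h1 := sorted2_pairwise_lex ps
  have hrev : (PySem.List.sorted2 ps (fun p => p.1) (fun p => p.2) true).reverse.Pairwise lexLe := by
    rw [List.pairwise_reverse]; exact sorted2_pairwise_lex_rev ps
  have hperm : (PySem.List.sorted2 ps (fun p => p.1) (fun p => p.2) true).reverse.Perm
      (PySem.List.sorted2 ps (fun p => p.1) (fun p => p.2)) := by
    refine (List.reverse_perm _).trans ?_
    exact (PySem.List.sorted2_perm ps _ _ true).trans (PySem.List.sorted2_perm ps _ _ false).symm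
  have heq := List.eq_of_perm_of_sorted (le := lexLe) ?_ hrev h1 hperm
  · rw [← heq, List.reverse_reverse]
  · intro x y _ _ hxy hyx
    unfold lexLe at hxy hyx
    ext <;> omega

theorem fstepA_singleton (l p : Int × Int) :
    fstepA [l] p = if p.1 ≤ l.2 + 1 then [(l.1, max l.2 p.2)] else [l, p] := by
  show (if p.1 ≤ l.2 + 1 then if l.2 < p.2 then [] ++ [(l.1, p.2)] else [l] else [l] ++ [p]) = _
  split_ifs with h1 h2
  · simp [max_eq_right (le_of_lt h2)]
  · have : max l.2 p.2 = l.2 := max_eq_left (by omega)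
    simp [this]
  · rfl

theorem fstepA_cons (q : Int × Int) (rest : List (Int × Int)) (p : Int × Int) (h : rest ≠ []) :
    fstepA (q :: rest) p = q :: fstepA rest p := by
  obtain ⟨init, l, hrest⟩ := List.eq_nil_or_concat rest |>.resolve_left h
  rw [List.concat_eq_append] at hrest
  subst hrest
  simp only [fstepA, List.getLast?_concat, show (q :: (init ++ [l])).getLast? = some l by
    rw [← List.cons_append, List.getLast?_concat]]
  split_ifs with h1 h2
  · rw [show (q :: (init ++ [l])).dropLast = q :: init by
      rw [← List.cons_append, List.dropLast_concat], List.dropLast_concat]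
    simp
  · rfl
  · simp

theorem bstepB_nil (x : Int × Int) : bstepB [] x = [(x.1, x.2)] := rfl

theorem bstepB_cons_pop (q : Int × Int) (Z : List (Int × Int)) (x : Int × Int)
    (h : q.1 ≤ x.2 + 1) : bstepB (q :: Z) x = bstepB Z (x.1, max x.2 q.2) := by
  simp [bstepB, popMergeB, h]

theorem bstepB_cons_stop (q : Int × Int) (Z : List (Int × Int)) (x : Int × Int)
    (h : ¬ q.1 ≤ x.2 + 1) : bstepB (q :: Z) x = (x.1, x.2) :: q :: Z := by
  simp [bstepB, popMergeB, h]

-- pop-absorb commutes with A's forward step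
theorem commute_step (S : List (Int × Int)) (x y : Int × Int) :
    bstepB (fstepA S y) x = fstepA (bstepB S x) y := by
  induction S generalizing x with
  | nil =>
    show bstepB [y] x = fstepA [(x.1, x.2)] y
    by_cases hy : y.1 ≤ x.2 + 1
    · rw [bstepB_cons_pop _ _ _ hy, bstepB_nil, fstepA_singleton, if_pos (by simpa using hy)]
    · rw [bstepB_cons_stop _ _ _ hy, fstepA_singleton, if_neg (by simpa using hy)]
  | cons q rest ih =>
    by_cases hrest : rest = []
    · subst hrest
      rw [show fstepA [q] y = if y.1 ≤ q.2 + 1 then [(q.1, max q.2 y.2)] else [q, y] from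
        fstepA_singleton q y]
      by_cases hq : q.1 ≤ x.2 + 1
      · by_cases hy : y.1 ≤ q.2 + 1
        · rw [if_pos hy, bstepB_cons_pop _ _ _ (by simpa using hq), bstepB_nil,
            bstepB_cons_pop _ _ _ hq, bstepB_nil, fstepA_singleton, if_pos (by simp; omega)]
          simp [max_assoc]
        · rw [if_neg hy, bstepB_cons_pop _ _ _ hq, bstepB_cons_pop _ _ _ hq, bstepB_nil,
            fstepA_singleton]
          by_cases hy2 : y.1 ≤ max x.2 q.2 + 1
          · rw [if_pos (by simpa using hy2), bstepB_cons_pop _ _ _ (by simpa using hy2), bstepB_nil]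
          · rw [if_neg (by simpa using hy2), bstepB_cons_stop _ _ _ (by simpa using hy2)]
      · by_cases hy : y.1 ≤ q.2 + 1
        · rw [if_pos hy, bstepB_cons_stop _ _ _ (by simpa using hq), bstepB_cons_stop _ _ _ hq,
            fstepA_cons _ _ _ (by simp), fstepA_singleton, if_pos hy]
        · rw [if_neg hy, bstepB_cons_stop _ _ _ hq, bstepB_cons_stop _ _ _ hq,
            fstepA_cons _ _ _ (by simp), fstepA_singleton, if_neg hy]
    · rw [fstepA_cons _ _ _ hrest]
      by_cases hq : q.1 ≤ x.2 + 1
      · rw [bstepB_cons_pop _ _ _ hq, bstepB_cons_pop _ _ _ hq, ih]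
      · rw [bstepB_cons_stop _ _ _ hq, bstepB_cons_stop _ _ _ hq,
          fstepA_cons _ _ _ (by simp), fstepA_cons _ _ _ hrest]

theorem fold_commute (t : List (Int × Int)) (S : List (Int × Int)) (x : Int × Int) :
    bstepB (t.foldl fstepA S) x = t.foldl fstepA (bstepB S x) := by
  induction t generalizing S with
  | nil => rfl
  | cons y t ih =>
    simp only [List.foldl_cons]
    rw [ih, commute_step]

theorem foldr_bstep_eq_foldl_fstep (ys : List (Int × Int)) :
    ys.foldr (fun p m => bstepB m p) [] = ys.foldl fstepA [] := by
  induction ys with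
  | nil => rfl
  | cons x t ih =>
    simp only [List.foldr_cons, List.foldl_cons]
    rw [ih, fold_commute]
    congr 1

theorem merge_eq (ps : List (Int × Int)) :
    (PySem.List.sorted2 ps (fun p => p.1) (fun p => p.2) true).foldl bstepB []
      = (PySem.List.sorted2 ps (fun p => p.1) (fun p => p.2)).foldl fstepA [] := by
  rw [sorted2_true_eq_reverse, List.foldl_reverse, foldr_bstep_eq_foldl_fstep]

theorem inline_foldl_eq (ps : List (Int × Int)) :
    ps.foldl (fun us p =>
      match us.getLast? with
      | some last =>
        if p.1 ≤ last.2 + 1 then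
          if last.2 < p.2 then us.dropLast ++ [(last.1, p.2)] else us
        else us ++ [p]
      | none => us ++ [p]) [] = ps.foldl fstepA [] := by
  apply List.foldl_ext
  intro us p _
  unfold fstepA
  cases us.getLast? <;> rfl

-- ===== VERDICT (by name: the statement is the Claim_ definition above) =====
theorem gtid_set_union_spec : Claim_equal_gtid_set_union := by
  intro a b _hdom _hpre
  show gtid_set_union a b = gtid_set_union_alt a b
  unfold gtid_set_union gtid_set_union_alt
  rw [groups_eq]
  refine congrArg (fun l => PySem.Str.join "," (PySem.List.sorted l (fun s => s))) ?_
  apply PySem.List.foldl_congr_mem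
  intro acc kv _
  simp only
  refine congrArg (fun s => acc ++ [PySem.Str.join ":" [kv.1, s]]) ?_
  rw [inline_foldl_eq, ← merge_eq]
  refine congrArg (PySem.Str.join ":") ?_
  apply List.map_congr_left
  intro p _
  by_cases h : p.1 = p.2 <;> simp [h]
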